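-- pv_equiv track=rewrite | github.com/tbarabosch/apihash_to_yara | hash_functions.py | sll1AddHash32
-- ===== SOURCE A (Python) =====
-- def sll1AddHash32(inString,fName):
--     if inString is None:
--         return 0
--     val = 0
--     for i in inString:
--         b = ord(i)
--         b = 0xff & (b | 0x60)
--         val = val + b
--         val = val << 1
--         val = 0xffffffff & val
--     return val
-- ===== SOURCE B (Python) =====
-- def sll1AddHash32(inString, fName):
--     if inString is None:
--         return 0
--     n = len(inString)
--     total = 0
--     for i, c in enumerate(inString):
--         total += (0xff & (ord(c) | 0x60)) << (n - i)
--     return 0xffffffff & total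
-- ===== Notes on version B (the rewrite author's own statement) =====
-- stated objective: alternative
-- what changed: Replaces the rolling masked shift-accumulator (val = ((val+b)<<1) & 0xffffffff per step) with a positional weighted sum: each masked byte contributes b << (n-i) to one big-int total, masked once at the end, justified by unfolding the recurrence modulo 2^32.
import Mathlib
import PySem

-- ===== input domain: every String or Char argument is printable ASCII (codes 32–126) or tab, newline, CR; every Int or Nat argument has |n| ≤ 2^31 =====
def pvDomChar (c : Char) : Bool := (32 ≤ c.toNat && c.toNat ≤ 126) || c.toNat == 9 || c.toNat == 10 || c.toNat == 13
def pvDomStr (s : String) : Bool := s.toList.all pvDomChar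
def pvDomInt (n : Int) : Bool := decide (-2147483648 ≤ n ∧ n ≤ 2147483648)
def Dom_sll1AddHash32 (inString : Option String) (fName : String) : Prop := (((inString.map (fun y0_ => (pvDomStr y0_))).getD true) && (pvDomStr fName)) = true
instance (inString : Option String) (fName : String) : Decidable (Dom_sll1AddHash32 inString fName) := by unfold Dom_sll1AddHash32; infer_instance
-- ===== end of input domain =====

-- B replaces A's per-step masked shift-accumulator by a positional weighted sum
-- (byte i weighted 2^(n-i)), masked once at the end; same O(n) cost, different decomposition.

-- ===== PORT A =====
-- Python values here are nonnegative throughout, so the loop state is kept as Nat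
-- and converted to Int at the return (exact: each step value is in [0, 2^32)).
def sll1AddHash32 (inString : Option String) (fName : String) : Int :=
  match inString with
  | none => 0
  | some s =>
      ((s.toList.foldl (fun val i =>
          let b := i.toNat
          let b := 0xff &&& (b ||| 0x60)
          let val := val + b
          let val := val <<< 1
          0xffffffff &&& val) 0 : Nat) : Int)

-- ===== PORT B =====
-- total and the bytes are nonnegative, kept as Nat; the shift count n - i is ≥ 1
-- for every produced index, so the Int subtraction is ported via .toNat (exact).
def sll1AddHash32_alt (inString : Option String) (fName : String) : Int :=
  match inString with
  | none => 0
  | some s =>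
      let n : Int := (s.toList.length : Int)
      let total : Nat :=
        (PySem.List.enumerate s.toList 0).foldl
          (fun total p => total + ((0xff &&& (p.2.toNat ||| 0x60)) <<< (n - p.1).toNat)) 0
      ((0xffffffff &&& total : Nat) : Int)

-- ===== PRECONDITION & SPEC =====
def Spec_sll1AddHash32 (inString : Option String) (fName : String) (out : Int) : Prop := out = sll1AddHash32_alt inString fName
instance (inString : Option String) (fName : String) (out : Int) : Decidable (Spec_sll1AddHash32 inString fName out) := by unfold Spec_sll1AddHash32; infer_instance

-- ===== CLAIM (what is proved, stated in full; the proofs are below) =====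
def Claim_equal_sll1AddHash32 : Prop := ∀ (inString : Option String) (fName : String), Dom_sll1AddHash32 inString fName → Spec_sll1AddHash32 inString fName (sll1AddHash32 inString fName)

-- ===== LEMMAS AND PROOFS =====

/-- The masked byte of a character. -/
def pvByte (c : Char) : Nat := 0xff &&& (c.toNat ||| 0x60)

/-- Weighted sum: head of a suffix of length m+1 carries weight 2^(m+1). -/
def pvWsum : List Char → Nat
  | [] => 0
  | c :: t => pvByte c * 2 ^ (t.length + 1) + pvWsum t

theorem pv_and_mask (x : Nat) : 0xffffffff &&& x = x % 4294967296 := by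
  have := Nat.and_two_pow_sub_one_eq_mod x 32
  rw [Nat.and_comm]
  norm_num at this ⊢; omega

/-- Characterisation of A's loop. -/
theorem pv_foldA (l : List Char) (v : Nat) (hv : v < 4294967296) :
    l.foldl (fun val i =>
        let b := i.toNat
        let b := 0xff &&& (b ||| 0x60)
        let val := val + b
        let val := val <<< 1
        0xffffffff &&& val) v
      = (v * 2 ^ l.length + pvWsum l) % 4294967296 := by
  induction l generalizing v with
  | nil => simp [pvWsum, Nat.mod_eq_of_lt hv]
  | cons c t ih =>
      simp only [List.foldl_cons, List.length_cons, pvWsum]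
      rw [ih _ (lt_of_le_of_lt (Nat.and_le_left) (by norm_num)), pv_and_mask, Nat.shiftLeft_eq]
      have h : ((v + pvByte c) * 2 ^ 1 % 4294967296) * 2 ^ t.length + pvWsum t
          ≡ (v + pvByte c) * 2 ^ 1 * 2 ^ t.length + pvWsum t [MOD 4294967296] :=
        ((Nat.mod_modEq _ _).mul_right _).add_right _
      calc (((v + pvByte c) * 2 ^ 1 % 4294967296) * 2 ^ t.length + pvWsum t) % 4294967296
          = ((v + pvByte c) * 2 ^ 1 * 2 ^ t.length + pvWsum t) % 4294967296 := h
        _ = (v * 2 ^ (t.length + 1) + (pvByte c * 2 ^ (t.length + 1) + pvWsum t)) % 4294967296 := by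
            ring_nf

/-- Characterisation of B's loop over a suffix starting at index k. -/
theorem pv_foldB (t : List Char) (k acc : Nat) (n : Int) (hn : n = k + t.length) :
    (PySem.List.enumerate t (k : Int)).foldl
        (fun total p => total + ((0xff &&& (p.2.toNat ||| 0x60)) <<< (n - p.1).toNat)) acc
      = acc + pvWsum t := by
  induction t generalizing k acc with
  | nil => simp [PySem.List.enumerate_nil, pvWsum]
  | cons c t ih =>
      rw [PySem.List.enumerate_cons, List.foldl_cons]
      have hk : ((k : Int) + 1) = ((k + 1 : Nat) : Int) := by push_cast; ring
      rw [hk, ih (k + 1) _ (by push_cast at hn ⊢; simp at hn; omega)]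
      have he : (n - (k : Int)).toNat = t.length + 1 := by
        simp at hn; omega
      simp only [pvWsum, pvByte, he, Nat.shiftLeft_eq]
      ring

-- ===== VERDICT (by name: the statement is the Claim_ definition above) =====
theorem sll1AddHash32_spec : Claim_equal_sll1AddHash32 := by
  intro inString fName _
  unfold Spec_sll1AddHash32 sll1AddHash32 sll1AddHash32_alt
  cases inString with
  | none => rfl
  | some s =>
      simp only
      have hB := pv_foldB s.toList 0 0 ((s.toList.length : Int)) (by push_cast; ring)
      push_cast at hB
      rw [pv_foldA _ _ (by norm_num), hB, pv_and_mask]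
      simp
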